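-- pv_equiv track=rewrite | github.com/yunnie05/Introduction-to-Programming | Week 6/ip072.py | super_swap
-- ===== SOURCE A (Python) =====
-- def super_swap(menu):
--     ls= set()
--     res= {}
--     v= set(menu.values())
--     for i in v:
--         for (x,y) in menu.items():
--             if y==i:
--                 ls.add(x)
--         res[i]=ls.copy()
--         ls.clear()
--     return res
-- ===== SOURCE B (Python) =====
-- def super_swap(menu):
--     items = list(menu.items())
--
--     def group(rest):
--         if not rest:
--             return {}
--         v = rest[0][1]
--         res = {v: {x for (x, y) in items if y == v}}
--         res.update(group([p for p in rest[1:] if p[1] != v]))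
--         return res
--
--     return group(items)
-- ===== Notes on version B (the rewrite author's own statement) =====
-- stated objective: alternative
-- what changed: Replaces the loop over set(menu.values()) that mutates a shared working set and result dict by a recursive decomposition: emit the group of the first remaining item's value (a set comprehension over the items), then recurse on the items whose value differs.
import Mathlib
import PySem

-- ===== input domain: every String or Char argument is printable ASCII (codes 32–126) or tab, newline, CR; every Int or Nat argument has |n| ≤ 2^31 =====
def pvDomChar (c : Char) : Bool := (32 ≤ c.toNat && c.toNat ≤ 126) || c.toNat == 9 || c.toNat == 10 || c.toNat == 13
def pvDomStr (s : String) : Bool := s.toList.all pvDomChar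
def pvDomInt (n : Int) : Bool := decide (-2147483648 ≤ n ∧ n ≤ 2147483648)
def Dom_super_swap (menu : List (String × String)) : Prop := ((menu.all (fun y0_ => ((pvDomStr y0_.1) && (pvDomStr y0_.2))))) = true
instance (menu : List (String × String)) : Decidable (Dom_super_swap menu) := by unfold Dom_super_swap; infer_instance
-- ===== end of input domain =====

-- B replaces A's loop over set(menu.values()) mutating a shared working set and result dict
-- by a recursive decomposition (emit the first remaining value's group, recurse on the rest);
-- objective: alternative (same asymptotic cost, different algorithmic structure).


-- ===== PORT A =====
-- the association-list argument denotes the Python dict built from it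
def super_swap (menu : List (String × String)) : List (String × List String) :=
  let d : PySem.Dict String String := PySem.Dict.ofList menu
  let v : PySem.Set String := PySem.Set.ofList d.values
  let res : PySem.Dict String (List String) :=
    v.foldl (fun res i =>
      let ls : PySem.Set String :=
        d.items.foldl (fun ls xy => if xy.2 == i then PySem.Set.add ls xy.1 else ls)
          PySem.Set.empty
      res.insert i ls) PySem.Dict.empty
  res.items

-- ===== PORT B =====
-- B's recursion: group of the first remaining value (a set comprehension over items),
-- then recurse on the remaining items whose value differs.
def superSwapGroup (items : List (String × String)) : List (String × String) → List (String × List String)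
  | [] => []
  | p :: rest =>
      (p.2, PySem.Set.ofList ((items.filter (fun xy => xy.2 == p.2)).map Prod.fst)) ::
        superSwapGroup items (rest.filter (fun q => !(q.2 == p.2)))
termination_by rest => rest.length
decreasing_by
  simp
  exact le_trans (List.length_filter_le _ _) (by simp)

def super_swap_alt (menu : List (String × String)) : List (String × List String) :=
  let items := (PySem.Dict.ofList menu).items
  superSwapGroup items items

-- ===== PRECONDITION & SPEC =====
def Spec_super_swap (menu : List (String × String)) (out : List (String × List String)) : Prop := out = super_swap_alt menu
instance (menu : List (String × String)) (out : List (String × List String)) : Decidable (Spec_super_swap menu out) := by unfold Spec_super_swap; infer_instance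

-- ===== CLAIM (what is proved, stated in full; the proofs are below) =====
def Claim_equal_super_swap : Prop := ∀ (menu : List (String × String)), Dom_super_swap menu → Spec_super_swap menu (super_swap menu)

-- ===== LEMMAS AND PROOFS =====

-- adding elements already covered by v ∈ s is a no-op, so equal values may be filtered out
theorem foldl_add_filter_ne {α : Type} [BEq α] [LawfulBEq α] (v : α) :
    ∀ (l : List α) (s : PySem.Set α), v ∈ s →
      l.foldl PySem.Set.add s = (l.filter (fun x => !(x == v))).foldl PySem.Set.add s := by
  intro l
  induction l with
  | nil => intro s _; rfl
  | cons x l ih =>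
      intro s hv
      simp only [List.foldl_cons, List.filter_cons]
      by_cases hx : x = v
      · subst hx
        have hadd : PySem.Set.add s x = s := by
          simp [PySem.Set.add, PySem.Set.contains, hv]
        simp only [beq_self_eq_true, Bool.not_true, Bool.false_eq_true, if_false, hadd]
        exact ih s hv
      · have hb : (x == v) = false := by simp [hx]
        simp only [hb, Bool.not_false, if_true, List.foldl_cons]
        have hv' : v ∈ PySem.Set.add s x := by
          unfold PySem.Set.add; split <;> simp [hv]
        exact ih _ hv'

-- an initial element absent from the tail stays in front of the fold
theorem foldl_add_cons_head {α : Type} [BEq α] [LawfulBEq α] (a : α) :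
    ∀ (l : List α) (s : PySem.Set α), a ∉ l →
      l.foldl PySem.Set.add (a :: s) = a :: l.foldl PySem.Set.add s := by
  intro l
  induction l with
  | nil => intro s _; rfl
  | cons x l ih =>
      intro s ha
      have hxa : x ≠ a := fun h => ha (h ▸ List.mem_cons_self ..)
      have h1 : PySem.Set.add (a :: s) x = a :: PySem.Set.add s x := by
        simp only [PySem.Set.add, PySem.Set.contains, List.contains_cons,
              show (x == a) = false by simp [hxa], Bool.false_or]
        split <;> simp
      simp only [List.foldl_cons, h1]
      exact ih _ (fun h => ha (List.mem_cons_of_mem _ h))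

-- first-occurrence characterisation of set(v :: l)
theorem ofList_cons_filter {α : Type} [BEq α] [LawfulBEq α] (v : α) (l : List α) :
    PySem.Set.ofList (v :: l) = v :: PySem.Set.ofList (l.filter (fun x => !(x == v))) := by
  have h0 : PySem.Set.ofList (v :: l) = l.foldl PySem.Set.add [v] := by
    simp [PySem.Set.ofList_eq_foldl, PySem.Set.add]
  rw [h0, foldl_add_filter_ne v l [v] (List.mem_singleton.2 rfl),
      foldl_add_cons_head v _ [] (by simp), PySem.Set.ofList_eq_foldl]

-- B's recursion computes the map over the first-occurrence-deduped value list
theorem superSwapGroup_eq (items : List (String × String)) :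
    ∀ rest : List (String × String),
      superSwapGroup items rest
        = (PySem.Set.ofList (rest.map Prod.snd)).map
            (fun i => (i, PySem.Set.ofList ((items.filter (fun xy => xy.2 == i)).map Prod.fst))) := by
  have main : ∀ (n : Nat) (rest : List (String × String)), rest.length ≤ n →
      superSwapGroup items rest
        = (PySem.Set.ofList (rest.map Prod.snd)).map
            (fun i => (i, PySem.Set.ofList ((items.filter (fun xy => xy.2 == i)).map Prod.fst))) := by
    intro n
    induction n with
    | zero =>
        intro rest h
        rw [List.length_eq_zero_iff.1 (Nat.le_zero.1 h), superSwapGroup]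
        rfl
    | succ n ih =>
        intro rest h
        match rest with
        | [] => rw [superSwapGroup]; rfl
        | p :: rest =>
            rw [superSwapGroup,
              ih _ (le_trans (List.length_filter_le _ _) (Nat.le_of_succ_le_succ h))]
            simp only [List.map_cons, ofList_cons_filter, List.filter_map]
            rfl
  exact fun rest => main rest.length rest le_rfl

-- A's inner scan collects (in order) the first components of the matching pairs, as a set
theorem innerScan_eq_ofList (l : List (String × String)) (i : String) :
    l.foldl (fun ls xy => if xy.2 == i then PySem.Set.add ls xy.1 else ls) PySem.Set.empty
      = PySem.Set.ofList ((l.filter (fun xy => xy.2 == i)).map Prod.fst) := by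
  rw [PySem.Set.ofList_eq_foldl, List.foldl_map, List.foldl_filter]
  rfl

-- A's result is the same map over the same deduped value list
theorem superSwap_eq_map (d : PySem.Dict String String) :
    ((PySem.Set.ofList d.values).foldl (fun res i =>
        res.insert i (d.items.foldl (fun ls xy => if xy.2 == i then PySem.Set.add ls xy.1 else ls)
          PySem.Set.empty)) (PySem.Dict.empty : PySem.Dict String (List String))).items
      = (PySem.Set.ofList (d.items.map Prod.snd)).map
          (fun i => (i, PySem.Set.ofList ((d.items.filter (fun xy => xy.2 == i)).map Prod.fst))) := by
  have hval : d.values = d.items.map Prod.snd := rfl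
  have h := PySem.Dict.items_foldl_insert_fresh (l := PySem.Set.ofList d.values) (k := fun i => i)
      (v := fun i => d.items.foldl (fun ls xy => if xy.2 == i then PySem.Set.add ls xy.1 else ls)
        (PySem.Set.empty : PySem.Set String))
      (d := (PySem.Dict.empty : PySem.Dict String (List String)))
      (by intro a _; simp [PySem.Dict.contains_empty])
      (by simp [PySem.Set.nodup_ofList])
  rw [show ((PySem.Dict.empty : PySem.Dict String (List String)).items = ([] : List (String × List String))) from rfl, List.nil_append] at h
  rw [h, hval]
  exact List.map_congr_left (fun i _ => by simp only [innerScan_eq_ofList])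

theorem super_swap_eq_alt (menu : List (String × String)) : super_swap menu = super_swap_alt menu := by
  unfold super_swap super_swap_alt
  rw [superSwap_eq_map, superSwapGroup_eq]

-- ===== VERDICT (by name: the statement is the Claim_ definition above) =====
theorem super_swap_spec : Claim_equal_super_swap := by
  intro menu _
  unfold Spec_super_swap
  exact super_swap_eq_alt menu
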